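-- pv_equiv track=rewrite | github.com/subhylahiri/numpy_linalg_extras | numpy_linalg/gufuncs/_util.py | _core_sizes
-- ===== SOURCE A (Python) =====
-- from typing import Any, Dict, List, Optional, Tuple
--
-- def _core_sizes(sigs_in: List[Tuple[str, ...]],
--                 cores: List[Tuple[int, ...]],
--                 msg: str) -> Dict[str, int]:
--     """Extract value of each size variable
--
--     Parameters
--     ----------
--     sigs_in : List[Tuple[str, ...]]
--         Signatures of input arrays
--     cores : List[Tuple[int, ...]]
--         Core shapes of input arrays
--     msg : str
--         Potential error message
--
--     Returns
--     -------
--     sizes : Dict[str, int]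
--         Values of each size variable
--
--     Raises
--     ------
--     ValueError
--         [description]
--     """
--     sizes = {}
--     for sig, core in zip(sigs_in, cores):
--         for name, siz in zip(sig, core):
--             sizes.setdefault(name, siz)
--             if sizes[name] != siz:
--                 raise ValueError('Array mismatch in its core ' + msg)
--     return sizes
-- ===== SOURCE B (Python) =====
-- def _core_sizes(sigs_in, cores, msg):
--     groups = {}
--     for sig, core in zip(sigs_in, cores):
--         for name, siz in zip(sig, core):
--             groups.setdefault(name, []).append(siz)
--     if any(s != szs[0] for szs in groups.values() for s in szs):
--         raise ValueError('Array mismatch in its core ' + msg)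
--     return {name: szs[0] for name, szs in groups.items()}
-- ===== Notes on version B (the rewrite author's own statement) =====
-- stated objective: alternative
-- what changed: B replaces A's single interleaved setdefault-then-check loop by a two-phase group-and-validate: it first builds a dict mapping each name to the list of ALL sizes seen for it, then validates each group against its first element and returns name -> first size.
import Mathlib
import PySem

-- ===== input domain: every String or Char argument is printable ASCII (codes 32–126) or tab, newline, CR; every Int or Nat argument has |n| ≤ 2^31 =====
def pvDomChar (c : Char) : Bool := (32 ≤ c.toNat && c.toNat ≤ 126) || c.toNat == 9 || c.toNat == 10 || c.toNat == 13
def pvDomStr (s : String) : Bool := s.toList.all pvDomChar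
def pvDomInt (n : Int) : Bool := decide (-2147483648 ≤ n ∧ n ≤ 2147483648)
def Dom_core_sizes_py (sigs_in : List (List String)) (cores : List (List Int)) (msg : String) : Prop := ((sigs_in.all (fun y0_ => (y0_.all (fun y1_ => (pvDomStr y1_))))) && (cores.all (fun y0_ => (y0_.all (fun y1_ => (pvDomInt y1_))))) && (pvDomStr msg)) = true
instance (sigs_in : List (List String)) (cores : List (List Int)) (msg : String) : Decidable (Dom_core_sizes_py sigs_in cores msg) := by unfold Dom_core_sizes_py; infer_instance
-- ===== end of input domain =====

-- B groups all sizes per name into a dict of lists first, then validates each group and takes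
-- its first element, instead of A's interleaved setdefault-and-check loop; objective: alternative
-- decomposition, same cost.  Equivalence is about the RETURN value; Pre_ excludes the inputs on
-- which A raises ValueError (inconsistent sizes for a name) — B raises there too.


-- ===== PORT A =====
-- A: one pass; sizes.setdefault(name, siz) then raise ValueError if sizes[name] != siz.
-- The raise is modelled as the state `none`; the port then returns [] (outside Pre_).
def core_sizes_py (sigs_in : List (List String)) (cores : List (List Int)) (msg : String) : List (String × Int) :=
  let res := (sigs_in.zip cores).foldl
    (fun st (p : List String × List Int) =>
      (p.1.zip p.2).foldl
        (fun st (q : String × Int) =>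
          match st with
          | none => none
          | some (d : PySem.Dict String Int) =>
            let d' := d.setdefault q.1 q.2
            if d'.get? q.1 ≠ some q.2 then none else some d')
        st)
    (some PySem.Dict.empty)
  match res with
  | none => []            -- ValueError('Array mismatch in its core ' + msg)
  | some d => d.items

-- ===== PORT B =====
-- B: build groups[name] = list of all sizes seen for name, then validate and take each head.
def core_sizes_py_alt (sigs_in : List (List String)) (cores : List (List Int)) (msg : String) : List (String × Int) :=
  let groups := (sigs_in.zip cores).foldl
    (fun g (p : List String × List Int) =>
      (p.1.zip p.2).foldl
        (fun (g : PySem.Dict String (List Int)) (q : String × Int) =>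
          g.modify q.1 [] (· ++ [q.2]))
        g)
    PySem.Dict.empty
  if groups.items.any (fun kl => kl.2.any (fun s => s ≠ kl.2.headD 0)) then
    []                    -- ValueError('Array mismatch in its core ' + msg)
  else
    groups.items.map (fun kl => (kl.1, kl.2.headD 0))

-- ===== PRECONDITION & SPEC =====
-- Pre_ excludes exactly the inputs on which A raises ValueError (the same name paired with two
-- different sizes); B raises the same ValueError there.
def Pre_core_sizes_py (sigs_in : List (List String)) (cores : List (List Int)) (msg : String) : Prop :=
  ∀ p ∈ (sigs_in.zip cores).flatMap (fun p => p.1.zip p.2),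
    ∀ q ∈ (sigs_in.zip cores).flatMap (fun p => p.1.zip p.2), p.1 = q.1 → p.2 = q.2
instance (sigs_in : List (List String)) (cores : List (List Int)) (msg : String) : Decidable (Pre_core_sizes_py sigs_in cores msg) := by unfold Pre_core_sizes_py; infer_instance
def pvWitness_core_sizes_py : List (List String) × List (List Int) × String :=
  ([["m", "n"], ["n", "k"]], [[2, 3], [3, 4]], "msg")
def Spec_core_sizes_py (sigs_in : List (List String)) (cores : List (List Int)) (msg : String) (out : List (String × Int)) : Prop := out = core_sizes_py_alt sigs_in cores msg
instance (sigs_in : List (List String)) (cores : List (List Int)) (msg : String) (out : List (String × Int)) : Decidable (Spec_core_sizes_py sigs_in cores msg out) := by unfold Spec_core_sizes_py; infer_instance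

-- ===== CLAIM (what is proved, stated in full; the proofs are below) =====
def Claim_equal_core_sizes_py : Prop := ∀ (sigs_in : List (List String)) (cores : List (List Int)) (msg : String), Dom_core_sizes_py sigs_in cores msg → Pre_core_sizes_py sigs_in cores msg → Spec_core_sizes_py sigs_in cores msg (core_sizes_py sigs_in cores msg)

-- ===== LEMMAS AND PROOFS =====

-- helper lemmas (proof-only, below the claim block)
lemma pvNest {sigma : Type} (f : sigma → String × Int → sigma)
    (l : List (List String × List Int)) (init : sigma) :
    l.foldl (fun s p => (p.1.zip p.2).foldl f s) init
      = (l.flatMap (fun p => p.1.zip p.2)).foldl f init := by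
  induction l generalizing init with
  | nil => rfl
  | cons h t ih => simp only [List.foldl_cons, List.flatMap_cons, List.foldl_append, ih]

lemma pvHeadD_mem {l : List Int} (h : l ≠ []) : l.headD 0 ∈ l := by
  cases l with
  | nil => exact absurd rfl h
  | cons a t => simp

lemma pvHeadD_append {l : List Int} (h : l ≠ []) (x : Int) :
    (l ++ [x]).headD 0 = l.headD 0 := by
  cases l with
  | nil => exact absurd rfl h
  | cons a t => simp

lemma pvContains_eq (d : PySem.Dict String Int) (g : PySem.Dict String (List Int))
    (h : d.items = g.items.map (fun kl => (kl.1, kl.2.headD 0))) (k : String) :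
    d.contains k = g.contains k := by
  show d.items.any (fun p => p.1 == k) = g.items.any (fun p => p.1 == k)
  rw [h, List.any_map]
  rfl

lemma pvMain (L₀ : List (String × Int))
    (hC : ∀ p ∈ L₀, ∀ q ∈ L₀, p.1 = q.1 → p.2 = q.2) :
    ∀ (L : List (String × Int)) (d : PySem.Dict String Int) (g : PySem.Dict String (List Int)),
      (∀ p ∈ L, p ∈ L₀) →
      g.keys.Nodup →
      d.items = g.items.map (fun kl => (kl.1, kl.2.headD 0)) →
      (∀ kl ∈ g.items, kl.2 ≠ [] ∧ ∀ s ∈ kl.2, (kl.1, s) ∈ L₀) →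
      (L.foldl (fun st (q : String × Int) =>
          match st with
          | none => none
          | some (d : PySem.Dict String Int) =>
            let d' := d.setdefault q.1 q.2
            if d'.get? q.1 ≠ some q.2 then none else some d') (some d)
        = some (L.foldl (fun d (q : String × Int) => d.setdefault q.1 q.2) d)) ∧
      (L.foldl (fun d (q : String × Int) => d.setdefault q.1 q.2) d).items
        = (L.foldl (fun (g : PySem.Dict String (List Int)) (q : String × Int) =>
            g.modify q.1 [] (· ++ [q.2])) g).items.map (fun kl => (kl.1, kl.2.headD 0)) ∧
      ((L.foldl (fun (g : PySem.Dict String (List Int)) (q : String × Int) =>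
            g.modify q.1 [] (· ++ [q.2])) g).keys.Nodup) ∧
      (∀ kl ∈ (L.foldl (fun (g : PySem.Dict String (List Int)) (q : String × Int) =>
            g.modify q.1 [] (· ++ [q.2])) g).items, kl.2 ≠ [] ∧ ∀ s ∈ kl.2, (kl.1, s) ∈ L₀) := by
  intro L
  induction L with
  | nil =>
    intro d g _ hnd hitems hinv
    exact ⟨rfl, hitems, hnd, hinv⟩
  | cons p L ih =>
    intro d g hmem hnd hitems hinv
    have hp : p ∈ L₀ := hmem p (List.mem_cons_self)
    have hsub : ∀ q ∈ L, q ∈ L₀ := fun q hq => hmem q (List.mem_cons_of_mem _ hq)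
    have hcont : d.contains p.1 = g.contains p.1 := pvContains_eq d g hitems p.1
    by_cases hc : g.contains p.1 = true
    · -- key already present: setdefault is a no-op, modify appends to the existing group
      have hdc : d.contains p.1 = true := by rw [hcont]; exact hc
      have hset : d.setdefault p.1 p.2 = d := PySem.Dict.setdefault_of_contains d _ hdc
      -- the value stored in d for p.1 is p.2 (consistency)
      obtain ⟨v, hv⟩ : ∃ v, d.get? p.1 = some v := by
        have := PySem.Dict.contains_eq_isSome_get? d p.1
        rw [hdc] at this
        exact Option.isSome_iff_exists.mp this.symm
      have hvd : (p.1, v) ∈ d.items := PySem.Dict.mem_items_of_get?_eq_some d hv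
      have hvL : (p.1, v) ∈ L₀ := by
        rw [hitems] at hvd
        obtain ⟨kl, hkl, hEq⟩ := List.mem_map.mp hvd
        obtain ⟨hne, hall⟩ := hinv kl hkl
        have h1 : kl.1 = p.1 := congrArg Prod.fst hEq
        have h2 : kl.2.headD 0 = v := congrArg Prod.snd hEq
        have := hall (kl.2.headD 0) (pvHeadD_mem hne)
        rwa [h1, h2] at this
      have hvp2 : v = p.2 := hC _ hvL _ hp rfl
      have hstep : (d.setdefault p.1 p.2).get? p.1 = some p.2 := by
        rw [PySem.Dict.get?_setdefault_self, hv]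
        simp [hvp2]
      -- g side
      obtain ⟨kl0, hkl0, hkl0k⟩ : ∃ kl ∈ g.items, kl.1 = p.1 := by
        have : g.items.any (fun q => q.1 == p.1) = true := hc
        obtain ⟨kl, hkl, hb⟩ := List.any_eq_true.mp this
        exact ⟨kl, hkl, by simpa using hb⟩
      have hgetD : g.getD p.1 [] = kl0.2 := by
        have := PySem.Dict.getD_of_mem_items (d := g) (k := kl0.1) (v := kl0.2)
          (by simpa using hkl0) hnd []
        rwa [hkl0k] at this
      have hg' : g.modify p.1 [] (· ++ [p.2]) = g.insert p.1 (g.getD p.1 [] ++ [p.2]) := rfl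
      have hitems' : (g.insert p.1 (g.getD p.1 [] ++ [p.2])).items
          = g.items.map (fun q => if (q.1 == p.1) = true then (p.1, g.getD p.1 [] ++ [p.2]) else q) :=
        PySem.Dict.items_insert_of_contains g _ hc
      have hkeys' : (g.insert p.1 (g.getD p.1 [] ++ [p.2])).keys = g.keys :=
        PySem.Dict.keys_insert_of_contains g _ hc
      -- the per-entry facts
      have hentry : ∀ q ∈ g.items, (q.1 == p.1) = true → q.2 = g.getD p.1 [] := by
        intro q hq hqk
        have hqk' : q.1 = p.1 := by simpa using hqk
        have := PySem.Dict.getD_of_mem_items (d := g) (k := q.1) (v := q.2)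
          (by simpa using hq) hnd []
        rw [hqk'] at this
        exact this.symm
      have hrel' : d.items = (g.insert p.1 (g.getD p.1 [] ++ [p.2])).items.map
          (fun kl => (kl.1, kl.2.headD 0)) := by
        rw [hitems', List.map_map, hitems]
        apply List.map_congr_left
        intro q hq
        by_cases hqk : (q.1 == p.1) = true
        · have hq2 : q.2 = g.getD p.1 [] := hentry q hq hqk
          have hne : q.2 ≠ [] := (hinv q hq).1
          simp only [Function.comp, hqk, if_pos]
          rw [← hq2, pvHeadD_append hne]
          have : q.1 = p.1 := by simpa using hqk
          rw [this]
        · simp only [Function.comp, hqk]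
          simp
      have hinv' : ∀ kl ∈ (g.insert p.1 (g.getD p.1 [] ++ [p.2])).items,
          kl.2 ≠ [] ∧ ∀ s ∈ kl.2, (kl.1, s) ∈ L₀ := by
        rw [hitems']
        intro kl hkl
        obtain ⟨q, hq, hEq⟩ := List.mem_map.mp hkl
        by_cases hqk : (q.1 == p.1) = true
        · rw [if_pos hqk] at hEq
          have hq2 : q.2 = g.getD p.1 [] := hentry q hq hqk
          have hqk' : q.1 = p.1 := by simpa using hqk
          subst hEq
          refine ⟨by simp, ?_⟩
          intro s hs
          rcases List.mem_append.mp hs with hs | hs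
          · rw [← hq2] at hs
            have := (hinv q hq).2 s hs
            rwa [hqk'] at this
          · have : s = p.2 := by simpa using hs
            subst this
            exact hp
        · rw [if_neg hqk] at hEq
          subst hEq
          exact hinv q hq
      obtain ⟨ha, hb', hc', hd'⟩ := ih d (g.insert p.1 (g.getD p.1 [] ++ [p.2])) hsub
        (by rw [hkeys']; exact hnd) hrel' hinv'
      refine ⟨?_, ?_, ?_, ?_⟩
      · simp only [List.foldl_cons]
        simp only [hset, hv, hvp2]
        simpa using ha
      · simp only [List.foldl_cons]
        rw [hset, hg']
        exact hb'
      · simp only [List.foldl_cons]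
        rw [hg']
        exact hc'
      · simp only [List.foldl_cons]
        rw [hg']
        exact hd'
    · -- fresh key: setdefault inserts, modify creates the singleton group
      have hgc : g.contains p.1 = false := by simpa using hc
      have hdc : d.contains p.1 = false := by rw [hcont]; exact hgc
      have hset : d.setdefault p.1 p.2 = d.insert p.1 p.2 :=
        PySem.Dict.setdefault_of_not_contains d _ hdc
      have hdnone : d.get? p.1 = none := (PySem.Dict.get?_eq_none_iff_contains d p.1).mpr hdc
      have hstep : (d.setdefault p.1 p.2).get? p.1 = some p.2 := by
        rw [PySem.Dict.get?_setdefault_self, hdnone]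
        rfl
      have hg' : g.modify p.1 [] (· ++ [p.2]) = g.insert p.1 [p.2] := by
        show g.insert p.1 (g.getD p.1 [] ++ [p.2]) = g.insert p.1 [p.2]
        rw [PySem.Dict.getD_of_not_contains g [] hgc]
        rfl
      have hitemsg : (g.insert p.1 [p.2]).items = g.items ++ [(p.1, [p.2])] :=
        PySem.Dict.items_insert_of_not_contains g _ hgc
      have hitemsd : (d.insert p.1 p.2).items = d.items ++ [(p.1, p.2)] :=
        PySem.Dict.items_insert_of_not_contains d _ hdc
      have hnd' : (g.insert p.1 [p.2]).keys.Nodup := by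
        rw [PySem.Dict.keys_insert_of_not_contains g _ hgc]
        have hnm : p.1 ∉ g.keys := by
          intro hm
          rw [(PySem.Dict.contains_iff_mem_keys g p.1).mpr hm] at hgc
          exact absurd hgc (by simp)
        simp [List.nodup_append, hnd]
        exact fun a ha h => hnm (h ▸ ha)
      have hrel' : (d.insert p.1 p.2).items = (g.insert p.1 [p.2]).items.map
          (fun kl => (kl.1, kl.2.headD 0)) := by
        rw [hitemsd, hitemsg, List.map_append, hitems]
        rfl
      have hinv' : ∀ kl ∈ (g.insert p.1 [p.2]).items, kl.2 ≠ [] ∧ ∀ s ∈ kl.2, (kl.1, s) ∈ L₀ := by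
        rw [hitemsg]
        intro kl hkl
        rcases List.mem_append.mp hkl with hkl | hkl
        · exact hinv kl hkl
        · have : kl = (p.1, [p.2]) := by simpa using hkl
          subst this
          refine ⟨by simp, ?_⟩
          intro s hs
          have : s = p.2 := by simpa using hs
          subst this
          exact hp
      obtain ⟨ha, hb', hc', hd'⟩ := ih (d.insert p.1 p.2) (g.insert p.1 [p.2]) hsub hnd' hrel' hinv'
      refine ⟨?_, ?_, ?_, ?_⟩
      · simp only [List.foldl_cons]
        rw [hset] at hstep
        simp only [hset, hstep]
        simpa using ha
      · simp only [List.foldl_cons]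
        rw [hset, hg']
        exact hb'
      · simp only [List.foldl_cons]
        rw [hg']
        exact hc'
      · simp only [List.foldl_cons]
        rw [hg']
        exact hd'

-- ===== VERDICT (by name: the statement is the Claim_ definition above) =====
theorem core_sizes_py_spec : Claim_equal_core_sizes_py := by
  intro sigs_in cores msg _ hpre
  show core_sizes_py sigs_in cores msg = core_sizes_py_alt sigs_in cores msg
  unfold core_sizes_py core_sizes_py_alt
  rw [pvNest, pvNest]
  obtain ⟨ha, hrel, hnd, hinv⟩ := pvMain _ hpre _ PySem.Dict.empty PySem.Dict.empty
    (fun p h => h) PySem.Dict.nodup_keys_empty rfl (by intro kl hkl; simp [PySem.Dict.empty] at hkl)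
  rw [ha]
  have hany : ((((sigs_in.zip cores).flatMap (fun p => p.1.zip p.2)).foldl
      (fun (g : PySem.Dict String (List Int)) (q : String × Int) =>
        g.modify q.1 [] (· ++ [q.2])) PySem.Dict.empty).items.any
      (fun kl => kl.2.any (fun s => s ≠ kl.2.headD 0))) = false := by
    rw [List.any_eq_false]
    intro kl hkl
    obtain ⟨hne, hall⟩ := hinv kl hkl
    rw [Bool.not_eq_true, List.any_eq_false]
    intro s hs
    have h1 : (kl.1, s) ∈ _ := hall s hs
    have h2 : (kl.1, kl.2.headD 0) ∈ _ := hall _ (pvHeadD_mem hne)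
    have h3 : s = kl.2.headD 0 := hpre _ h1 _ h2 rfl
    rw [List.headD_eq_head?_getD] at h3
    simp [h3]
  simp only [hany, if_neg, Bool.false_eq_true, not_false_iff]
  exact hrel
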